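-- pv_equiv track=rewrite | github.com/Abdul-Muneeb-git/Code-forces | coins transformation.py | coinstransformation
-- ===== SOURCE A (Python) =====
-- def coinstransformation(n):
--     if n <= 3:
--         return 1
--     coins = 1
--
--     while n > 3:
--         n //= 4
--         coins *= 2
--     return coins
-- ===== SOURCE B (Python) =====
-- def coinstransformation(n):
--     if n <= 3:
--         return 1
--     return 2 ** ((n.bit_length() - 1) // 2)
-- ===== Notes on version B (the rewrite author's own statement) =====
-- stated objective: simpler
-- what changed: Replaces the divide-by-4 loop by the closed form 2**((n.bit_length()-1)//2), which equals 2**floor(log4(n)) for n>=4.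
import Mathlib
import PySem

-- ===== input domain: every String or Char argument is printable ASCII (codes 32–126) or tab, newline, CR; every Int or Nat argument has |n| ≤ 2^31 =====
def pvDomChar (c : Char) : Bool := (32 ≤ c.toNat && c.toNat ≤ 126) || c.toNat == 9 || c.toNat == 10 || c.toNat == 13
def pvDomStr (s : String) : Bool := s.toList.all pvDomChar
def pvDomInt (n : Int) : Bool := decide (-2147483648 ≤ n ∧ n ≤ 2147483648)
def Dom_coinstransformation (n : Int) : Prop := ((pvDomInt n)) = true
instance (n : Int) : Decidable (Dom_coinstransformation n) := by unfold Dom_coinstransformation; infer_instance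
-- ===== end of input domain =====

-- B replaces A's divide-by-4 loop by the closed form 2^((bit_length(n)-1)/2); equal on all ints.

-- ===== PORT A =====
-- the while loop of A, state (n, coins)
def coinsLoop (n coins : Int) : Int :=
  if 3 < n then coinsLoop (PySem.Int.floordiv n 4) (coins * 2) else coins
termination_by n.toNat
decreasing_by
  simp only [PySem.Int.floordiv]
  have := Int.fdiv_eq_ediv_of_nonneg (a := n) (b := 4) (by omega)
  omega

def coinstransformation (n : Int) : Int :=
  if n ≤ 3 then 1 else coinsLoop n 1

-- ===== PORT B =====
-- Python's int.bit_length for nonnegative arguments (B only calls it on n ≥ 4)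
def bitLenNat : Nat → Nat
  | 0 => 0
  | n + 1 => bitLenNat ((n + 1) / 2) + 1

def coinstransformation_alt (n : Int) : Int :=
  if n ≤ 3 then 1 else 2 ^ ((bitLenNat n.toNat - 1) / 2)

-- ===== PRECONDITION & SPEC =====
def Spec_coinstransformation (n : Int) (out : Int) : Prop := out = coinstransformation_alt n
instance (n : Int) (out : Int) : Decidable (Spec_coinstransformation n out) := by unfold Spec_coinstransformation; infer_instance

-- ===== CLAIM (what is proved, stated in full; the proofs are below) =====
def Claim_equal_coinstransformation : Prop := ∀ (n : Int), Dom_coinstransformation n → Spec_coinstransformation n (coinstransformation n)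

-- ===== LEMMAS AND PROOFS =====
theorem bitLenNat_pos_eq (m : Nat) (h : 0 < m) : bitLenNat m = bitLenNat (m / 2) + 1 := by
  cases m with
  | zero => omega
  | succ k => simp [bitLenNat]

theorem bitLenNat_div4 (m : Nat) (h : 4 ≤ m) : bitLenNat (m / 4) = bitLenNat m - 2 := by
  have h1 := bitLenNat_pos_eq m (by omega)
  have h2 := bitLenNat_pos_eq (m / 2) (by omega)
  rw [show m / 4 = m / 2 / 2 from by omega]
  omega

theorem bitLenNat_small (m : Nat) (h4 : 4 ≤ m) (h15 : m ≤ 15) :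
    (bitLenNat m - 1) / 2 = 1 := by
  interval_cases m <;> simp [bitLenNat]

theorem bitLenNat_ge3 (m : Nat) (h : 4 ≤ m) : 3 ≤ bitLenNat m := by
  have h1 := bitLenNat_pos_eq m (by omega)
  have h2 := bitLenNat_pos_eq (m / 2) (by omega)
  have h3 := bitLenNat_pos_eq (m / 2 / 2) (by omega)
  omega

theorem coinsLoop_closed : ∀ (k : Nat), ∀ (n c : Int), n.toNat = k → 4 ≤ n →
    coinsLoop n c = c * 2 ^ ((bitLenNat n.toNat - 1) / 2) := by
  intro k
  induction k using Nat.strong_induction_on with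
  | _ k ih =>
    intro n c hk hn
    unfold coinsLoop
    have h4 : PySem.Int.floordiv n 4 = ((n.toNat / 4 : Nat) : Int) := by
      simp only [PySem.Int.floordiv]
      have := Int.fdiv_eq_ediv_of_nonneg (a := n) (b := 4) (by omega)
      omega
    simp only [if_pos (by omega : (3:Int) < n), h4]
    by_cases hb : 4 ≤ n.toNat / 4
    · -- n ≥ 16: recurse
      have hrec := ih (n.toNat / 4) (by omega) ((n.toNat / 4 : Nat) : Int) (c * 2)
        (by omega) (by exact_mod_cast hb)
      rw [hrec]
      simp only [Int.toNat_natCast]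
      rw [bitLenNat_div4 n.toNat (by omega)]
      have h3 := bitLenNat_ge3 n.toNat (by omega)
      have harith : (bitLenNat n.toNat - 2 - 1) / 2 + 1 = (bitLenNat n.toNat - 1) / 2 := by
        have h5 : 5 ≤ bitLenNat n.toNat := by
          have := bitLenNat_ge3 (n.toNat / 4) hb
          have := bitLenNat_div4 n.toNat (by omega)
          omega
        omega
      rw [← harith, pow_succ]
      ring
    · -- 4 ≤ n ≤ 15: one more unfolding stops
      unfold coinsLoop
      have : ¬ (3 : Int) < ((n.toNat / 4 : Nat) : Int) := by
        push Not; exact_mod_cast (by omega : n.toNat / 4 ≤ 3)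
      rw [if_neg this]
      rw [bitLenNat_small n.toNat (by omega) (by omega)]
      ring

-- ===== VERDICT (by name: the statement is the Claim_ definition above) =====
theorem coinstransformation_spec : Claim_equal_coinstransformation := by
  intro n _
  unfold Spec_coinstransformation coinstransformation coinstransformation_alt
  by_cases h : n ≤ 3
  · simp [h]
  · rw [if_neg h, if_neg h]
    rw [coinsLoop_closed n.toNat n 1 rfl (by omega)]
    ring
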